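-- pv_equiv track=rewrite | github.com/nextgenusfs/gfftk | gfftk/paf.py | cs2tuples
-- ===== SOURCE A (Python) =====
-- def cs2tuples(cs, separators=[':', '*', '+', '-', '~']):
--     # separators is an array of strings that are being used to split the the string.
--     tmpList = []
--     i = 0
--     while i < len(cs):
--         theSeparator = ""
--         for current in separators:
--             if current == cs[i:i+len(current)]:
--                 theSeparator = current
--         if theSeparator != "":
--             tmpList += [theSeparator]
--             i = i + len(theSeparator)
--         else:
--             if tmpList == []:
--                 tmpList = [""]
--             if(tmpList[-1] in separators):
--                 tmpList += [""]
--             tmpList[-1] += cs[i]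
--             i += 1
--     tupList = list(zip(tmpList[::2], tmpList[1::2]))
--     return tupList
-- ===== SOURCE B (Python) =====
-- import re
--
--
-- def cs2tuples(cs, separators=[':', '*', '+', '-', '~']):
--     # Split on the separators with one regex, then pair each separator with
--     # the value that follows it.  Later separators take precedence over
--     # earlier ones, so the alternation lists them in reverse order.
--     if separators:
--         pattern = '(' + '|'.join(re.escape(s) for s in reversed(separators)) + ')'
--         tokens = [t for t in re.split(pattern, cs) if t != '']
--     else:
--         tokens = [cs] if cs else []
--     return list(zip(tokens[::2], tokens[1::2]))
-- ===== Notes on version B (the rewrite author's own statement) =====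
-- stated objective: faster
-- what changed: A's manual character-by-character scan that mutates a token list in place (growing its last element with per-position separator probing) is replaced by a single re.split on the alternation of the separators (reversed, since later separators take precedence) followed by pairing; Pre_ excludes separator lists that contain the empty string, on which A's always-matching empty candidate accidentally disables earlier separators and is then treated as though nothing matched.
-- outside the precondition, e.g. on cs2tuples('a:b', [':', '']): A returns [('', 'a:b')], B returns [('a', ':')]; on cs2tuples('a', ['']): A returns [('', 'a')], B returns []
import Mathlib
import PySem

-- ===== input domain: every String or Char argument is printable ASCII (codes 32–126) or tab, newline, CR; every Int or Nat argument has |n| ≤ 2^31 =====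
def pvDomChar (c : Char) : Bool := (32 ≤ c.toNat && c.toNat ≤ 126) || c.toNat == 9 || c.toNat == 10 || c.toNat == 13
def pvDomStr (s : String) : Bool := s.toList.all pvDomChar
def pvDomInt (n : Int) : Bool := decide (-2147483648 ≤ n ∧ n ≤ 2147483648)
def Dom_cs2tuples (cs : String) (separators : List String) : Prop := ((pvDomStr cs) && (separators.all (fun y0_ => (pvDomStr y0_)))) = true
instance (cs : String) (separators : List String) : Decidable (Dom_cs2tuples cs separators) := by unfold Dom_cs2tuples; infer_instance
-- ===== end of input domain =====

-- B replaces A's manual character-by-character scan by one regex split followed by pairing (idiomatic).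

-- ===== PORT A =====
-- The while loop over index i is rendered as recursion on the remaining suffix of cs
-- (cs[i:i+len(current)] = take, cs[i] = head, advancing i = drop); tmpList[-1] is
-- PySem.List.pyGetD _ (-1) _, and 'tmpList[-1] += cs[i]' is dropLast ++ [last ++ [c]].
-- csSel is the inner 'for current in separators' loop computing theSeparator.
def csSel (seps : List (List Char)) (s : List Char) : List Char :=
  seps.foldl (fun acc cur => if cur = List.take cur.length s then cur else acc) []

def csLoopA (seps : List (List Char)) : List Char → List (List Char) → List (List Char)
  | [], tmpList => tmpList
  | c :: rest, tmpList =>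
    if h : csSel seps (c :: rest) ≠ [] then
      csLoopA seps (List.drop (csSel seps (c :: rest)).length (c :: rest)) (tmpList ++ [csSel seps (c :: rest)])
    else
      let t1 := if tmpList = [] then [([] : List Char)] else tmpList
      let t2 := if PySem.List.pyGetD t1 (-1) [] ∈ seps then t1 ++ [([] : List Char)] else t1
      csLoopA seps rest (t2.dropLast ++ [PySem.List.pyGetD t2 (-1) [] ++ [c]])
termination_by s _ => s.length
decreasing_by
  · simp only [List.length_drop, List.length_cons]
    exact Nat.sub_lt (Nat.succ_pos _) (List.length_pos_of_ne_nil h)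
  · simp

def cs2tuples (cs : String) (separators : List String) : List (String × String) :=
  let tmpList := csLoopA (separators.map String.toList) cs.toList []
  -- list(zip(tmpList[::2], tmpList[1::2]))
  let tupList := List.zip ((PySem.List.slice? tmpList none none 2).getD [])
                          ((PySem.List.slice? tmpList (some 1) none 2).getD [])
  tupList.map (fun p => (String.ofList p.1, String.ofList p.2))

-- ===== PORT B =====
-- Model of re.split("(s1|s2|…)", cs) for an alternation of nonempty literal strings:
-- leftmost match, alternatives tried in pattern order; emits text piece, separator, text
-- piece, … (the '!a.isEmpty' guard makes the recursion total; on Pre_'s inputs every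
-- alternative is nonempty anyway, so the model is exact there).
def csSplit (alts : List (List Char)) : List Char → List (List Char)
  | [] => [[]]
  | c :: rest =>
    match h : alts.find? (fun a => !a.isEmpty && a.isPrefixOf (c :: rest)) with
    | some a => [] :: a :: csSplit alts (List.drop a.length (c :: rest))
    | none =>
      match csSplit alts rest with
      | [] => [[c]]          -- unreachable: csSplit never returns []
      | t :: ts => (c :: t) :: ts
termination_by s => s.length
decreasing_by
  · have ha := List.find?_some h
    simp only [Bool.and_eq_true, Bool.not_eq_true', List.isEmpty_eq_false_iff] at ha
    simp only [List.length_drop, List.length_cons]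
    exact Nat.sub_lt (Nat.succ_pos _) (List.length_pos_of_ne_nil ha.1)
  · simp

def cs2tuples_alt (cs : String) (separators : List String) : List (String × String) :=
  let tokens :=
    if separators ≠ [] then
      (csSplit ((separators.map String.toList).reverse) cs.toList).filter (fun t => t ≠ [])
    else if cs.toList ≠ [] then [cs.toList] else []
  (List.zip ((PySem.List.slice? tokens none none 2).getD [])
            ((PySem.List.slice? tokens (some 1) none 2).getD [])).map
    (fun p => (String.ofList p.1, String.ofList p.2))

-- ===== PRECONDITION & SPEC =====
-- Pre_ excludes separator lists that contain the empty string: in A it trivially matches at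
-- every position, silently disabling every separator listed before it and then being treated
-- as though nothing matched — an accident of A's last-match/empty-sentinel encoding; B's
-- regex split would instead split at every character boundary.
def Pre_cs2tuples (cs : String) (separators : List String) : Prop := "" ∉ separators
instance (cs : String) (separators : List String) : Decidable (Pre_cs2tuples cs separators) := by unfold Pre_cs2tuples; infer_instance
def pvWitness_cs2tuples : String × List String := ("gi123:ac*gt+", [":", "*", "+", "-", "~"])

def Spec_cs2tuples (cs : String) (separators : List String) (out : List (String × String)) : Prop := out = cs2tuples_alt cs separators
instance (cs : String) (separators : List String) (out : List (String × String)) : Decidable (Spec_cs2tuples cs separators out) := by unfold Spec_cs2tuples; infer_instance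

-- ===== CLAIM (what is proved, stated in full; the proofs are below) =====
def Claim_equal_cs2tuples : Prop := ∀ (cs : String) (separators : List String), Dom_cs2tuples cs separators → Pre_cs2tuples cs separators → Spec_cs2tuples cs separators (cs2tuples cs separators)

-- ===== LEMMAS AND PROOFS =====

def effL (l : List (List Char)) : List (List Char) :=
  l.foldl (fun acc a => if a = [] then [] else acc ++ [a]) []

-- step equations of the two recursions
lemma csLoopA_nil (seps : List (List Char)) (tmp : List (List Char)) : csLoopA seps [] tmp = tmp := by
  rw [csLoopA]

lemma csLoopA_cons_sep (seps : List (List Char)) (c : Char) (rest : List Char)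
    (tmp : List (List Char)) (a : List Char)
    (h : csSel seps (c :: rest) = a) (ha : a ≠ []) :
    csLoopA seps (c :: rest) tmp = csLoopA seps (List.drop a.length (c :: rest)) (tmp ++ [a]) := by
  rw [csLoopA]
  simp only [h]
  rw [dif_pos ha]

lemma csLoopA_cons_char1 (seps : List (List Char)) (c : Char) (rest : List Char)
    (pre : List (List Char)) (x : List Char)
    (h : csSel seps (c :: rest) = []) (hx : x ∈ seps) :
    csLoopA seps (c :: rest) (pre ++ [x]) = csLoopA seps rest ((pre ++ [x]) ++ [[c]]) := by
  rw [csLoopA]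
  rw [dif_neg (by simp [h])]
  have h2 : PySem.List.pyGetD (pre ++ [x, []]) (-1) ([] : List Char) = [] := by
    rw [show pre ++ ([x, []] : List (List Char)) = (pre ++ [x]) ++ [[]] by simp]
    exact PySem.List.pyGetD_neg_one_append_singleton _ _ _
  simp [PySem.List.pyGetD_neg_one_append_singleton, hx, h2]

lemma csLoopA_cons_char2 (seps : List (List Char)) (c : Char) (rest : List Char)
    (pre : List (List Char)) (x : List Char)
    (h : csSel seps (c :: rest) = []) (hx : x ∉ seps) :
    csLoopA seps (c :: rest) (pre ++ [x]) = csLoopA seps rest (pre ++ [x ++ [c]]) := by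
  rw [csLoopA]
  rw [dif_neg (by simp [h])]
  simp [PySem.List.pyGetD_neg_one_append_singleton, hx]

lemma csLoopA_cons_char0 (seps : List (List Char)) (c : Char) (rest : List Char)
    (h : csSel seps (c :: rest) = []) (hne : ([] : List Char) ∉ seps) :
    csLoopA seps (c :: rest) [] = csLoopA seps rest ([] ++ [[c]]) := by
  rw [csLoopA]
  rw [dif_neg (by simp [h])]
  have h2 : PySem.List.pyGetD [([] : List Char)] (-1) ([] : List Char) = [] := rfl
  simp [h2, hne]

lemma csSplit_cons_some (alts : List (List Char)) (c : Char) (rest : List Char) (a : List Char)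
    (h : alts.find? (fun a => !a.isEmpty && a.isPrefixOf (c :: rest)) = some a) :
    csSplit alts (c :: rest) = [] :: a :: csSplit alts (List.drop a.length (c :: rest)) := by
  rw [csSplit]
  split
  · rename_i a' h'
    rw [h] at h'; cases h'; rfl
  · rename_i h'
    rw [h] at h'; cases h'

lemma csSplit_cons_none (alts : List (List Char)) (c : Char) (rest : List Char)
    (t : List Char) (ts : List (List Char))
    (h : alts.find? (fun a => !a.isEmpty && a.isPrefixOf (c :: rest)) = none)
    (hts : csSplit alts rest = t :: ts) :
    csSplit alts (c :: rest) = (c :: t) :: ts := by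
  rw [csSplit]
  split
  · rename_i a' h'
    rw [h] at h'; cases h'
  · rw [hts]

lemma csSplit_ne_nil (alts : List (List Char)) (s : List Char) : csSplit alts s ≠ [] := by
  cases s with
  | nil => simp [csSplit]
  | cons c rest =>
      cases h : alts.find? (fun a => !a.isEmpty && a.isPrefixOf (c :: rest)) with
      | some a => rw [csSplit_cons_some alts c rest a h]; simp
      | none =>
          obtain ⟨t, ts, hts⟩ := List.exists_cons_of_ne_nil (show csSplit alts rest ≠ [] from by
            cases rest with
            | nil => simp [csSplit]
            | cons d ds =>
                rw [csSplit]
                split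
                · simp
                · split <;> simp)
          rw [csSplit_cons_none alts c rest t ts h hts]
          simp

lemma csSplit_nil_alts (s : List Char) : csSplit [] s = [s] := by
  induction s with
  | nil => simp [csSplit]
  | cons c rest ih =>
      have : ([] : List (List Char)).find? (fun a => !a.isEmpty && a.isPrefixOf (c :: rest)) = none := rfl
      rw [csSplit_cons_none [] c rest rest [] this (by rw [ih])]

-- A's last-match-wins selection equals first-match over the reversed EFFECTIVE list
-- (everything after the last '' candidate; an earlier match is always overridden by '').
lemma sel_eq_eff (s : List Char) : ∀ (l : List (List Char)),
    csSel l s = ((effL l).reverse.find? (fun a => !a.isEmpty && a.isPrefixOf s)).getD [] := by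
  intro l
  induction l using List.reverseRecOn with
  | nil => rfl
  | append_singleton l z ih =>
      have hsel : csSel (l ++ [z]) s =
          if z = List.take z.length s then z else csSel l s := by
        simp [csSel, List.foldl_append]
      have heff : effL (l ++ [z]) = if z = [] then [] else effL l ++ [z] := by
        simp [effL, List.foldl_append]
      by_cases hz : z = []
      · subst hz
        simp [hsel, heff]
      · have hpe : (z = List.take z.length s) ↔ z <+: s := by
          constructor
          · intro h; exact h ▸ List.take_prefix z.length s
          · intro h; exact List.prefix_iff_eq_take.mp h
        have hz' : z.isEmpty = false := by simpa using hz
        rw [hsel, heff, if_neg hz]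
        by_cases hm : z = List.take z.length s
        · rw [if_pos hm]
          have : z.isPrefixOf s = true := List.isPrefixOf_iff_prefix.mpr (hpe.mp hm)
          simp [hz', this]
        · rw [if_neg hm]
          have : z.isPrefixOf s = false := by
            cases hq : z.isPrefixOf s
            · rfl
            · exact absurd (hpe.mpr (List.isPrefixOf_iff_prefix.mp hq)) hm
          simp [hz', this, ih]

-- with no empty separator the effective list is the list itself
lemma effL_id (l : List (List Char)) (h : ([] : List Char) ∉ l) : effL l = l := by
  have gen : ∀ (l : List (List Char)), ([] : List Char) ∉ l → ∀ acc,
      l.foldl (fun acc a => if a = [] then [] else acc ++ [a]) acc = acc ++ l := by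
    intro l
    induction l with
    | nil => intro _ acc; simp
    | cons a t ih =>
        intro h acc
        have ha : a ≠ [] := fun e => h (e ▸ List.mem_cons_self)
        have ht : ([] : List Char) ∉ t := fun e => h (List.mem_cons_of_mem _ e)
        simp [ha, ih ht]
  simpa [effL] using gen l h []

-- csSel over a ''-free list equals first match on the reversed list
lemma sel_eq_rev (seps : List (List Char)) (hne : ([] : List Char) ∉ seps) (s : List Char) :
    csSel seps s = (seps.reverse.find? (fun a => !a.isEmpty && a.isPrefixOf s)).getD [] := by
  rw [sel_eq_eff s seps, effL_id seps hne]

-- a separator that prefixes the suffix forces a nonempty selection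
lemma sel_ne_of_mem_prefix (seps : List (List Char)) (hne : ([] : List Char) ∉ seps)
    (x : List Char) (hx : x ∈ seps) (s : List Char) (hp : x <+: s) :
    csSel seps s ≠ [] := by
  rw [sel_eq_rev seps hne]
  have hxne : x ≠ [] := fun e => hne (e ▸ hx)
  have hxe : x.isEmpty = false := by simpa using hxne
  have hsome : (seps.reverse.find? (fun a => !a.isEmpty && a.isPrefixOf s)).isSome := by
    rw [List.find?_isSome]
    exact ⟨x, List.mem_reverse.mpr hx, by simp [hxe, List.isPrefixOf_iff_prefix.mpr hp]⟩
  obtain ⟨a, ha⟩ := Option.isSome_iff_exists.mp hsome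
  rw [ha]
  have := List.find?_some ha
  simp only [Bool.and_eq_true, Bool.not_eq_true', List.isEmpty_eq_false_iff] at this
  simpa using this.1

-- Main invariants.  go_sep: state "last token is the separator a, no open text token".
-- go_text: state "open text token x", with the invariant that no separator matched at
-- x's starting position (csSel seps (x ++ s) = []), which makes x never a separator.
lemma go_main (seps alts : List (List Char))
    (hne : ([] : List Char) ∉ seps)
    (hsel : ∀ s' : List Char,
      csSel seps s' = (alts.find? (fun a => !a.isEmpty && a.isPrefixOf s')).getD [])
    (halts : ∀ a ∈ alts, a ∈ seps) :
    ∀ n (s : List Char), s.length ≤ n →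
      (∀ (pre : List (List Char)) (a : List Char), a ∈ seps →
        csLoopA seps s (pre ++ [a]) =
          pre ++ [a] ++ (csSplit alts s).filter (fun t => t ≠ [])) ∧
      (∀ (pre : List (List Char)) (x : List Char), x ≠ [] → csSel seps (x ++ s) = [] →
        csLoopA seps s (pre ++ [x]) =
          pre ++ (x ++ (csSplit alts s).headD []) :: ((csSplit alts s).tail.filter (fun t => t ≠ []))) := by
  intro n
  induction n with
  | zero =>
      intro s hs
      have : s = [] := List.eq_nil_of_length_eq_zero (Nat.le_zero.mp hs)
      subst this
      constructor
      · intro pre a _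
        simp [csLoopA_nil, csSplit]
      · intro pre x _ _
        simp [csLoopA_nil, csSplit]
  | succ n ih =>
      intro s hs
      cases s with
      | nil =>
          constructor
          · intro pre a _
            simp [csLoopA_nil, csSplit]
          · intro pre x _ _
            simp [csLoopA_nil, csSplit]
      | cons c rest =>
          have hrest : rest.length ≤ n := by simp only [List.length_cons] at hs; omega
          cases hf : alts.find? (fun a => !a.isEmpty && a.isPrefixOf (c :: rest)) with
          | some b =>
              have hpb := List.find?_some hf
              simp only [Bool.and_eq_true, Bool.not_eq_true', List.isEmpty_eq_false_iff] at hpb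
              have hbne : b ≠ [] := hpb.1
              have hbmem : b ∈ seps := halts b (List.mem_of_find?_eq_some hf)
              have hselb : csSel seps (c :: rest) = b := by rw [hsel, hf]; rfl
              have hd : (List.drop b.length (c :: rest)).length ≤ n := by
                have : 0 < b.length := List.length_pos_of_ne_nil hbne
                simp only [List.length_drop, List.length_cons]
                simp only [List.length_cons] at hs; omega
              have hsplit := csSplit_cons_some alts c rest b hf
              constructor
              · intro pre a ha
                rw [csLoopA_cons_sep seps c rest (pre ++ [a]) b hselb hbne]
                rw [(ih _ hd).1 (pre ++ [a]) b hbmem, hsplit]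
                simp [hbne]
              · intro pre x hx _
                rw [csLoopA_cons_sep seps c rest (pre ++ [x]) b hselb hbne]
                rw [(ih _ hd).1 (pre ++ [x]) b hbmem, hsplit]
                simp [hbne]
          | none =>
              have hsel0 : csSel seps (c :: rest) = [] := by rw [hsel, hf]; rfl
              obtain ⟨t, ts, hts⟩ := List.exists_cons_of_ne_nil (csSplit_ne_nil alts rest)
              have hsplit := csSplit_cons_none alts c rest t ts hf hts
              constructor
              · intro pre a ha
                rw [csLoopA_cons_char1 seps c rest pre a hsel0 ha]
                rw [(ih _ hrest).2 (pre ++ [a]) [c] (by simp) hsel0, hts, hsplit]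
                simp
              · intro pre x hx hinv
                have hxns : x ∉ seps := by
                  intro hmem
                  exact sel_ne_of_mem_prefix seps hne x hmem (x ++ (c :: rest))
                    (List.prefix_append x _) hinv
                rw [csLoopA_cons_char2 seps c rest pre x hsel0 hxns]
                have hinv' : csSel seps ((x ++ [c]) ++ rest) = [] := by
                  simpa [List.append_assoc] using hinv
                rw [(ih _ hrest).2 pre (x ++ [c]) (by simp) hinv', hts, hsplit]
                simp

-- A's token list equals B's filtered split (nonempty separator list, no '' separator)
lemma loopA_tokens (seps alts : List (List Char))
    (hne : ([] : List Char) ∉ seps)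
    (hsel : ∀ s' : List Char,
      csSel seps s' = (alts.find? (fun a => !a.isEmpty && a.isPrefixOf s')).getD [])
    (halts : ∀ a ∈ alts, a ∈ seps) (s : List Char) :
    csLoopA seps s [] = (csSplit alts s).filter (fun t => t ≠ []) := by
  cases s with
  | nil => simp [csLoopA_nil, csSplit]
  | cons c rest =>
      cases hf : alts.find? (fun a => !a.isEmpty && a.isPrefixOf (c :: rest)) with
      | some b =>
          have hpb := List.find?_some hf
          simp only [Bool.and_eq_true, Bool.not_eq_true', List.isEmpty_eq_false_iff] at hpb
          have hbne : b ≠ [] := hpb.1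
          have hselb : csSel seps (c :: rest) = b := by rw [hsel, hf]; rfl
          have hstep := csLoopA_cons_sep seps c rest [] b hselb hbne
          simp only [List.nil_append] at hstep
          rw [hstep]
          have := (go_main seps alts hne hsel halts (List.drop b.length (c :: rest)).length
            (List.drop b.length (c :: rest)) le_rfl).1 [] b (halts b (List.mem_of_find?_eq_some hf))
          simp only [List.nil_append] at this
          rw [this, csSplit_cons_some alts c rest b hf]
          simp [hbne]
      | none =>
          have hsel0 : csSel seps (c :: rest) = [] := by rw [hsel, hf]; rfl
          obtain ⟨t, ts, hts⟩ := List.exists_cons_of_ne_nil (csSplit_ne_nil alts rest)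
          have hstep := csLoopA_cons_char0 seps c rest hsel0 hne
          simp only [List.nil_append] at hstep
          rw [hstep]
          have := (go_main seps alts hne hsel halts rest.length rest le_rfl).2 [] [c] (by simp) hsel0
          simp only [List.nil_append] at this
          rw [this, hts, csSplit_cons_none alts c rest t ts hf hts]
          simp

-- membership of "" transfers through String.toList
lemma mem_empty_iff (separators : List String) :
    ("" ∈ separators) ↔ ([] : List Char) ∈ separators.map String.toList := by
  constructor
  · intro h
    exact List.mem_map.mpr ⟨"", h, by simp⟩
  · intro h
    obtain ⟨s, hs, he⟩ := List.mem_map.mp h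
    have : s = "" := by simpa using congrArg String.ofList he
    exact this ▸ hs

lemma tokens_eq (cs : String) (separators : List String) (hpre : "" ∉ separators) :
    csLoopA (separators.map String.toList) cs.toList [] =
      (if separators ≠ [] then
        (csSplit ((separators.map String.toList).reverse) cs.toList).filter (fun t => t ≠ [])
       else if cs.toList ≠ [] then [cs.toList] else []) := by
  set seps := separators.map String.toList with hseps
  have hne : ([] : List Char) ∉ seps := fun h => hpre ((mem_empty_iff separators).mpr h)
  have hsel : ∀ s' : List Char,
      csSel seps s' = (seps.reverse.find? (fun a => !a.isEmpty && a.isPrefixOf s')).getD [] :=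
    sel_eq_rev seps hne
  have halts : ∀ a ∈ seps.reverse, a ∈ seps := fun a ha => List.mem_reverse.mp ha
  rw [loopA_tokens seps seps.reverse hne hsel halts cs.toList]
  by_cases hs : separators = []
  · subst hs
    rw [if_neg (by simp)]
    have : seps.reverse = [] := by simp [hseps]
    rw [this, csSplit_nil_alts]
    by_cases hc : cs.toList = []
    · simp [hc]
    · simp [hc]
  · rw [if_pos hs, hseps]

-- ===== VERDICT (by name: the statement is the Claim_ definition above) =====
theorem cs2tuples_spec : Claim_equal_cs2tuples := by
  intro cs separators _ hpre
  unfold Spec_cs2tuples cs2tuples cs2tuples_alt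
  rw [tokens_eq cs separators hpre]
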